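-- pv_equiv track=rewrite | github.com/K123AsJ0k1/cloud-hpc-oss-mlops-platform | applications/development/LLMs/pipeline/preprocessing/ray_step_1/functions/paths.py | round_robin_division
-- ===== SOURCE A (Python) =====
-- def round_robin_division(
--     target_list: any,
--     number: int
-- ) -> any:
--     lists = [[] for _ in range(number)]
--     i = 0
--     sorted_list = sorted(target_list, key = lambda x: (x[-2], x[-1]))
--     for elem in sorted_list:
--         lists[i].append(elem)
--         i = (i + 1) % number
--     return lists
-- ===== SOURCE B (Python) =====
-- def round_robin_division(target_list, number):
--     sorted_list = sorted(target_list, key=lambda x: (x[-2], x[-1]))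
--     return [sorted_list[j::number] for j in range(number)]
-- ===== Notes on version B (the rewrite author's own statement) =====
-- stated objective: idiomatic
-- what changed: A fills buckets in one sequential pass with a cycling index and in-place appends; B builds each bucket independently as a comprehension selecting the sorted elements whose index is congruent to the bucket number mod number.
import Mathlib
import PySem

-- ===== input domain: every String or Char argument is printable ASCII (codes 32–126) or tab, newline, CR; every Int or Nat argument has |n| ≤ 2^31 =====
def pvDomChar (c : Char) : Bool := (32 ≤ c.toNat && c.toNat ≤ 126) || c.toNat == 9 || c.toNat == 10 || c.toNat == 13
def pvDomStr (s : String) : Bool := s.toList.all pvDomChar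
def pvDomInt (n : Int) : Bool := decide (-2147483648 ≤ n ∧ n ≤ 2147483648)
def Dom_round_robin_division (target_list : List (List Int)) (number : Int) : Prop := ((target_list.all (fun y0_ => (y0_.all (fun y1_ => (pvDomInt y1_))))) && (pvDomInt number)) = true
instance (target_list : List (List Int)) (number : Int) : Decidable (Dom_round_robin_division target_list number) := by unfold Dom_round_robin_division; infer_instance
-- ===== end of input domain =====

-- B replaces A's single append-and-cycle pass over the sorted list with strided slices, one per bucket (idiomatic; return value only — neither version observably mutates its arguments).

-- ===== PORT A =====
def round_robin_division (target_list : List (List Int)) (number : Int) : List (List (List Int)) :=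
  let lists : List (List (List Int)) := (PySem.List.pyRange 0 number 1).map (fun _ => [])
  let sorted_list := PySem.List.sorted2 target_list
    (fun x => PySem.List.pyGetD x (-2) 0) (fun x => PySem.List.pyGetD x (-1) 0) false
  let st := sorted_list.foldl
    (fun (st : List (List (List Int)) × Int) elem =>
      (st.1.modify st.2.toNat (fun b => b ++ [elem]), PySem.Int.mod (st.2 + 1) number))
    (lists, 0)
  st.1

-- ===== PORT B =====
-- sorted_list[j::number] is PySem.List.slice?; inside the list comprehension 0 ≤ j < number, so the
-- step is never 0 and the slice is always `some …` — `.getD []` only discharges the unreachable none.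
def round_robin_division_alt (target_list : List (List Int)) (number : Int) : List (List (List Int)) :=
  let sorted_list := PySem.List.sorted2 target_list
    (fun x => PySem.List.pyGetD x (-2) 0) (fun x => PySem.List.pyGetD x (-1) 0) false
  (PySem.List.pyRange 0 number 1).map (fun j =>
    (PySem.List.slice? sorted_list (some j) none number).getD [])

-- ===== PRECONDITION & SPEC =====
-- Pre_ excludes exactly the inputs on which A raises: a non-empty list with number ≤ 0
-- (IndexError on the empty bucket list) and any element of length < 2 (IndexError in the sort key x[-2]).
def Pre_round_robin_division (target_list : List (List Int)) (number : Int) : Prop :=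
  (target_list ≠ [] → 1 ≤ number) ∧ ∀ x ∈ target_list, 2 ≤ x.length
instance (target_list : List (List Int)) (number : Int) : Decidable (Pre_round_robin_division target_list number) := by unfold Pre_round_robin_division; infer_instance

def pvWitness_round_robin_division : List (List Int) × Int := ([[3, 1], [0, 2], [3, 0]], 2)

def Spec_round_robin_division (target_list : List (List Int)) (number : Int) (out : List (List (List Int))) : Prop := out = round_robin_division_alt target_list number
instance (target_list : List (List Int)) (number : Int) (out : List (List (List Int))) : Decidable (Spec_round_robin_division target_list number out) := by unfold Spec_round_robin_division; infer_instance

-- ===== CLAIM (what is proved, stated in full; the proofs are below) =====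
def Claim_equal_round_robin_division : Prop := ∀ (target_list : List (List Int)) (number : Int), Dom_round_robin_division target_list number → Pre_round_robin_division target_list number → Spec_round_robin_division target_list number (round_robin_division target_list number)

-- ===== LEMMAS AND PROOFS =====

-- the contribution of the remaining elements to bucket j, when A's cycling index currently is i
def bucketFrom (number : Int) (s : List (List Int)) (i j : Int) : List (List Int) :=
  match s with
  | [] => []
  | e :: s => (if i = j then [e] else []) ++ bucketFrom number s (PySem.Int.mod (i + 1) number) j

-- every m-th element of s, starting after skipping d elements
def strideL (m : Nat) (s : List (List Int)) (d : Nat) : List (List Int) :=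
  match s, d with
  | [], _ => []
  | x :: t, 0 => x :: strideL m t (m - 1)
  | _ :: t, d + 1 => strideL m t d

theorem loop_spec (number : Int) (hn : 1 ≤ number) :
    ∀ (s : List (List Int)) (B : List (List (List Int))) (i : Int),
      B.length = number.toNat → 0 ≤ i → i < number →
      (s.foldl
        (fun (st : List (List (List Int)) × Int) elem =>
          (st.1.modify st.2.toNat (fun b => b ++ [elem]), PySem.Int.mod (st.2 + 1) number))
        (B, i)).1
      = (PySem.List.pyRange 0 number 1).map (fun j => B.getD j.toNat [] ++ bucketFrom number s i j) := by
  intro s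
  induction s with
  | nil =>
    intro B i hB _ _
    simp only [List.foldl_nil, bucketFrom, List.append_nil]
    rw [PySem.List.pyRange_one]
    apply List.ext_getElem
    · simp [hB]
    · intro k h1 h2
      simp only [List.getElem_map, List.getElem_range]
      have hk : k < B.length := by simpa using h1
      simp [List.getD_eq_getElem?_getD, List.getElem?_eq_getElem hk]
  | cons e s ih =>
    intro B i hB hi0 hi
    have hiN : i.toNat < B.length := by omega
    simp only [List.foldl_cons]
    rw [ih (B.modify i.toNat (fun b => b ++ [e])) (PySem.Int.mod (i + 1) number)
        (by rw [List.length_modify]; exact hB)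
        (PySem.Int.mod_nonneg _ (by omega))
        (PySem.Int.mod_lt _ (by omega))]
    apply List.map_congr_left
    intro j hj
    have hj' : 0 ≤ j ∧ j < number := (PySem.List.mem_pyRange_one).1 hj
    have hjN : j.toNat < B.length := by omega
    simp only [bucketFrom]
    have hget : (B.modify i.toNat (fun b => b ++ [e])).getD j.toNat []
        = B.getD j.toNat [] ++ (if i = j then [e] else []) := by
      have hjlen : j.toNat < (B.modify i.toNat (fun b => b ++ [e])).length := by
        rw [List.length_modify]; exact hjN
      rw [List.getD_eq_getElem _ _ hjN, List.getD_eq_getElem _ _ hjlen,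
          List.getElem_modify]
      by_cases h : i = j
      · simp [h]
      · have : i.toNat ≠ j.toNat := by omega
        simp [this, h]
    rw [hget, List.append_assoc]

theorem strideL_of_len_le (m : Nat) : ∀ (s : List (List Int)) (d : Nat), s.length ≤ d → strideL m s d = [] := by
  intro s
  induction s with
  | nil => intro d _; simp [strideL]
  | cons x t ih =>
    intro d hd
    match d, hd with
    | d + 1, hd => simpa [strideL] using ih d (by simpa using hd)

theorem filterMap_range_strideL (M : Nat) (hM : 1 ≤ M) :
    ∀ (s : List (List Int)) (d c : Nat), (∀ k, d + M * k < s.length → k < c) →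
      (List.range c).filterMap (fun k => s[d + M * k]?) = strideL M s d := by
  intro s
  induction s with
  | nil =>
    intro d c _
    simp [strideL]
  | cons x t ih =>
    intro d c hc
    cases d with
    | zero =>
      obtain ⟨c', rfl⟩ : ∃ c', c = c' + 1 := by
        have := hc 0 (by simp)
        exact ⟨c - 1, by omega⟩
      rw [List.range_succ_eq_map, List.filterMap_cons, List.filterMap_map]
      simp only [Nat.mul_zero, Nat.add_zero, List.getElem?_cons_zero]
      have hstep : ((fun k => (x :: t)[0 + M * k]?) ∘ Nat.succ)
          = fun k => t[(M - 1) + M * k]? := by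
        funext k
        have hidx : 0 + M * (k + 1) = ((M - 1) + M * k) + 1 := by
          cases M with
          | zero => omega
          | succ m => ring_nf; omega
        simp only [Function.comp, Nat.succ_eq_add_one, hidx, List.getElem?_cons_succ]
      rw [hstep, ih (M - 1) c' ?_]
      · simp [strideL]
      · intro k hk
        have h2 : M * (k + 1) = M * k + M := Nat.mul_succ M k
        have := hc (k + 1) (by simp only [List.length_cons]; omega)
        omega
    | succ d =>
      have hstep : (fun k => (x :: t)[(d + 1) + M * k]?) = fun k => t[d + M * k]? := by
        funext k
        have hidx : (d + 1) + M * k = (d + M * k) + 1 := by omega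
        rw [hidx, List.getElem?_cons_succ]
      rw [hstep, ih d c (by intro k hk; exact hc k (by simpa using by omega))]
      simp [strideL]

theorem slice_stride (number : Int) (hn : 1 ≤ number) (s : List (List Int)) (j : Int) (hj : 0 ≤ j) :
    (PySem.List.slice? s (some j) none number).getD [] = strideL number.toNat s j.toNat := by
  have hne : number ≠ 0 := by omega
  have hnotneg : ¬ number < 0 := by omega
  simp only [PySem.List.slice?, PySem.List.sliceIndices, hne, if_neg hnotneg,
    if_neg (by omega : ¬ j < 0), if_false, Option.getD_some, if_pos (by omega : 0 < number)]
  by_cases hle : j ≤ (s.length : Int)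
  · rw [min_eq_left hle]
    have hnum' : ((number.toNat : Int)) = number := Int.toNat_of_nonneg (by omega)
    have hj' : ((j.toNat : Int)) = j := Int.toNat_of_nonneg hj
    have hidx : (fun (x : Nat) => s[(j + number * (x : Int)).toNat]?)
        = fun (x : Nat) => s[j.toNat + number.toNat * x]? := by
      funext k
      have hmk : number * (k : Int) = ((number.toNat * k : Nat) : Int) := by
        rw [Nat.cast_mul, hnum']
      congr 1
      rw [hmk]
      omega
    rw [hidx]
    apply filterMap_range_strideL number.toNat (by omega)
    intro k hk
    have hjlt : j < (s.length : Int) := by omega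
    rw [if_pos hjlt]
    have hcast : ((number.toNat * k : Nat) : Int) = number * (k : Int) := by
      rw [Nat.cast_mul, hnum']
    have hklt : j + number * (k : Int) < (s.length : Int) := by omega
    have hdiv : (k : Int) + 1 ≤ ((s.length : Int) - j + number - 1) / number := by
      rw [Int.le_ediv_iff_mul_le (by omega)]
      nlinarith [hklt]
    omega
  · rw [min_eq_right (by omega), if_neg (by omega)]
    simp only [List.range_zero, List.filterMap_nil]
    exact (strideL_of_len_le _ s j.toNat (by omega)).symm

theorem bucketFrom_strideL (number : Int) (hn : 1 ≤ number) (j : Int) (hj0 : 0 ≤ j) (hj : j < number) :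
    ∀ (s : List (List Int)) (i : Int), 0 ≤ i → i < number →
      bucketFrom number s i j = strideL number.toNat s ((j - i) % number).toNat := by
  intro s
  induction s with
  | nil => intro i _ _; simp [bucketFrom, strideL]
  | cons e t ih =>
    intro i hi0 hi
    have hpos : (0 : Int) < number := by omega
    have hmodi : PySem.Int.mod (i + 1) number = (i + 1) % number :=
      PySem.Int.mod_eq_emod_of_pos hpos
    have hi0' : 0 ≤ (i + 1) % number := Int.emod_nonneg _ (by omega)
    have hi1' : (i + 1) % number < number := Int.emod_lt_of_pos _ hpos
    simp only [bucketFrom, hmodi]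
    rw [ih _ hi0' hi1']
    have hkey : (j - (i + 1) % number) % number = (j - (i + 1)) % number := by
      conv_lhs => rw [Int.sub_emod, Int.emod_emod_of_dvd _ (dvd_refl _), ← Int.sub_emod]
    have hneg1 : (-1 : Int) % number = number - 1 := by
      have h1 : (-1 + number) % number = (-1 : Int) % number := Int.add_emod_right (-1) number
      rw [← h1, Int.emod_eq_of_lt (by omega) (by omega)]
      omega
    by_cases hij : i = j
    · subst hij
      have h0 : (i - i) % number = 0 := by rw [Int.sub_self]; exact Int.zero_emod number
      have hm1 : (i - (i + 1)) % number = number - 1 := by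
        have : i - (i + 1) = -1 := by ring
        rw [this, hneg1]
      rw [hkey, hm1, h0, if_pos rfl]
      have ht : (number - 1).toNat = number.toNat - 1 := by omega
      have h00 : ((0 : Int)).toNat = 0 := rfl
      rw [ht, h00]
      simp [strideL]
    · rw [if_neg hij, List.nil_append, hkey]
      have hbounds : 1 ≤ (j - i) % number ∧ (j - i) % number < number ∧
          (j - (i + 1)) % number = (j - i) % number - 1 := by
        rcases lt_or_gt_of_ne hij with hlt | hgt
        · have ho : (j - i) % number = j - i := Int.emod_eq_of_lt (by omega) (by omega)
          have ho' : (j - (i + 1)) % number = j - i - 1 := by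
            have : j - (i + 1) = j - i - 1 := by ring
            rw [this, Int.emod_eq_of_lt (by omega) (by omega)]
          exact ⟨by omega, by omega, by omega⟩
        · have h1 : (j - i + number) % number = (j - i) % number := Int.add_emod_right _ _
          have ho : (j - i) % number = j - i + number := by
            rw [← h1, Int.emod_eq_of_lt (by omega) (by omega)]
          have ho' : (j - (i + 1)) % number = j - i - 1 + number := by
            have h2 : (j - (i + 1) + number) % number = (j - (i + 1)) % number :=
              Int.add_emod_right _ _
            have h3 : j - (i + 1) + number = j - i - 1 + number := by ring
            rw [← h2, h3, Int.emod_eq_of_lt (by omega) (by omega)]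
          exact ⟨by omega, by omega, by omega⟩
      obtain ⟨hb1, hb2, hb3⟩ := hbounds
      rw [hb3]
      have hsucc : ((j - i) % number).toNat = ((j - i) % number - 1).toNat + 1 := by omega
      rw [hsucc]
      simp [strideL]

theorem round_robin_division_spec : Claim_equal_round_robin_division := by
  intro target_list number _ hpre
  unfold Spec_round_robin_division round_robin_division round_robin_division_alt
  rcases hpre with ⟨hne, _⟩
  by_cases hempty : target_list = []
  · subst hempty
    by_cases hnum : number ≤ 0
    · rw [PySem.List.pyRange_one_eq_nil (by omega)]
      rfl
    · apply List.map_congr_left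
      intro j hj
      have hj' := (PySem.List.mem_pyRange_one).1 hj
      rw [slice_stride number (by omega) _ j hj'.1]
      simp [PySem.List.sorted2, strideL]
  · have hn : 1 ≤ number := hne hempty
    set s := PySem.List.sorted2 target_list
      (fun x => PySem.List.pyGetD x (-2) 0) (fun x => PySem.List.pyGetD x (-1) 0) false with hs
    rw [loop_spec number hn s _ 0 (by simp [PySem.List.length_pyRange_one]) le_rfl (by omega)]
    apply List.map_congr_left
    intro j hj
    have hj' := (PySem.List.mem_pyRange_one).1 hj
    rw [bucketFrom_strideL number hn j hj'.1 hj'.2 s 0 le_rfl (by omega)]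
    have hemod : (j - 0) % number = j := by
      rw [Int.sub_zero, Int.emod_eq_of_lt hj'.1 hj'.2]
    rw [hemod, slice_stride number hn s j hj'.1]
    have : (((PySem.List.pyRange 0 number 1).map
        (fun _ => ([] : List (List Int)))).getD j.toNat []) = [] := by
      rcases h : ((PySem.List.pyRange 0 number 1).map (fun _ => ([] : List (List Int))))[j.toNat]? with _ | v
      · simp [List.getD_eq_getElem?_getD]
      · rcases List.getElem?_eq_some_iff.1 h with ⟨hlt, hv⟩
        simp only [List.getElem_map] at hv
        simp [List.getD_eq_getElem?_getD]
    rw [this, List.nil_append]
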